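-- pv_equiv track=rewrite | github.com/joramador/surp-23 | su23_processing/process_results.py | num_comm_node_belongs
-- ===== SOURCE A (Python) =====
-- def num_comm_node_belongs(overlap):
--     num_belong = dict()
--     for node in overlap:
--         num_comm = len(overlap[node])
--         if num_comm not in num_belong:
--             num_belong[num_comm] = 1
--         else:
--             num_belong[num_comm] = num_belong[num_comm] + 1
--
--     keys = list(num_belong.keys())
--     keys.sort()
--     sorted_num_belong = {i : num_belong[i] for i in keys}
--     return sorted_num_belong
-- ===== SOURCE B (Python) =====
-- def num_comm_node_belongs(overlap):
--     # Sort the raw per-node community counts first, then group runs: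
--     # no intermediate frequency table is maintained while counting.
--     counts = sorted(len(overlap[node]) for node in overlap)
--     result = {}
--     i = 0
--     n = len(counts)
--     while i < n:
--         j = i
--         while j < n and counts[j] == counts[i]:
--             j += 1
--         result[counts[i]] = j - i
--         i = j
--     return result
-- ===== Notes on version B (the rewrite author's own statement) =====
-- stated objective: alternative
-- what changed: Instead of maintaining a frequency dict while iterating and then sorting its keys, B sorts the raw list of per-node community counts once and produces the result dict by a single run-length grouping scan over the sorted list.
import Mathlib
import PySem

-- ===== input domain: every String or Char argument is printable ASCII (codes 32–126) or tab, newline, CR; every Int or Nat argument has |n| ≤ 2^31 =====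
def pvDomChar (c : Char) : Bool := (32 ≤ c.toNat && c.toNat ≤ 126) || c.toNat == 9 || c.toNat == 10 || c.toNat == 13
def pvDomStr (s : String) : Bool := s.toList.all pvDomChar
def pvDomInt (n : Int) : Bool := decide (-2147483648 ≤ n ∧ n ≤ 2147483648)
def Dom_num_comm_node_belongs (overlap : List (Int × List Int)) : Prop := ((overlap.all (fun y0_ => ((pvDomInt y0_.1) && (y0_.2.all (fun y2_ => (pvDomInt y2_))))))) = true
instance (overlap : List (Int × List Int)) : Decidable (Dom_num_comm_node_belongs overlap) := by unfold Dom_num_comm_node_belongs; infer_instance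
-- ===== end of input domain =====

-- B sorts the raw per-node community counts and builds the result by one run-length
-- grouping scan, instead of A's frequency dict followed by a key sort (alternative decomposition).


-- ===== PORT A =====
def num_comm_node_belongs (overlap : List (Int × List Int)) : List (Int × Int) :=
  let ov : PySem.Dict Int (List Int) := PySem.Dict.ofList overlap
  -- for node in overlap: build the frequency dict num_belong
  let num_belong : PySem.Dict Int Int :=
    ov.keys.foldl (fun d node =>
      let num_comm : Int := ((ov.getD node []).length : Int)
      if d.contains num_comm = false then d.insert num_comm 1
      else d.insert num_comm (d.getD num_comm 0 + 1)) PySem.Dict.empty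
  -- keys = list(num_belong.keys()); keys.sort()
  let keys := PySem.List.sorted num_belong.keys (fun k => k) false
  -- {i : num_belong[i] for i in keys}
  (keys.foldl (fun r i => r.insert i (num_belong.getD i 0)) PySem.Dict.empty).items

-- ===== PORT B =====
-- run-length grouping scan over a list (the two nested while loops of Source B)
def pvRuns : List Int → List (Int × Int)
  | [] => []
  | x :: xs =>
      (x, (1 + (xs.takeWhile (fun y => y == x)).length : Int)) ::
        pvRuns (xs.dropWhile (fun y => y == x))
termination_by l => l.length
decreasing_by simpa using Nat.lt_succ_of_le (List.length_dropWhile_le _ _)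

def num_comm_node_belongs_alt (overlap : List (Int × List Int)) : List (Int × Int) :=
  let ov : PySem.Dict Int (List Int) := PySem.Dict.ofList overlap
  let counts := PySem.List.sorted (ov.keys.map (fun node => ((ov.getD node []).length : Int))) (fun x => x) false
  pvRuns counts

-- ===== PRECONDITION & SPEC =====
def Spec_num_comm_node_belongs (overlap : List (Int × List Int)) (out : List (Int × Int)) : Prop := out = num_comm_node_belongs_alt overlap
instance (overlap : List (Int × List Int)) (out : List (Int × Int)) : Decidable (Spec_num_comm_node_belongs overlap out) := by unfold Spec_num_comm_node_belongs; infer_instance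

-- ===== CLAIM (what is proved, stated in full; the proofs are below) =====
def Claim_equal_num_comm_node_belongs : Prop := ∀ (overlap : List (Int × List Int)), Dom_num_comm_node_belongs overlap → Spec_num_comm_node_belongs overlap (num_comm_node_belongs overlap)

-- ===== LEMMAS AND PROOFS =====

set_option maxRecDepth 8192 in
theorem pvRuns_spec (s : List Int) (hs : s.Pairwise (· ≤ ·)) :
    pvRuns s = ((pvRuns s).map Prod.fst).map (fun v => (v, (s.count v : Int)))
    ∧ ((pvRuns s).map Prod.fst).Pairwise (· < ·)
    ∧ (∀ v, v ∈ (pvRuns s).map Prod.fst ↔ v ∈ s) := by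
  induction s using pvRuns.induct with
  | case1 => simp [pvRuns]
  | case2 x xs ih =>
    have hx : ∀ y ∈ xs, x ≤ y := fun y hy => (List.pairwise_cons.mp hs).1 y hy
    have hxs : xs.Pairwise (· ≤ ·) := (List.pairwise_cons.mp hs).2
    have hsplit : xs.takeWhile (fun y => y == x) ++ xs.dropWhile (fun y => y == x) = xs :=
      List.takeWhile_append_dropWhile
    have ht : ∀ y ∈ xs.takeWhile (fun y => y == x), y = x := by
      intro y hy
      have := List.mem_takeWhile_imp hy
      simpa using this
    have hrsub : (xs.dropWhile (fun y => y == x)).Sublist xs := List.dropWhile_sublist _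
    have hr_pw : (xs.dropWhile (fun y => y == x)).Pairwise (· ≤ ·) := hxs.sublist hrsub
    have hr_lt : ∀ y ∈ xs.dropWhile (fun y => y == x), x < y := by
      intro y hy
      cases hrw : xs.dropWhile (fun y => y == x) with
      | nil => rw [hrw] at hy; simp at hy
      | cons a r' =>
        rw [hrw] at hy
        have h2 : (a == x) = false := by
          have h := List.head?_dropWhile_not (fun y => y == x) xs
          rw [hrw] at h
          exact h
        have hane : a ≠ x := by
          intro he; rw [he] at h2; rw [BEq.rfl] at h2; exact Bool.noConfusion h2
        have hamem : a ∈ xs := hrsub.mem (hrw ▸ List.mem_cons_self)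
        have hax : x < a := lt_of_le_of_ne (hx a hamem) (Ne.symm hane)
        rcases hy with _ | hy'
        · exact hax
        · rename_i hy'
          have : a ≤ y := by
            rw [hrw] at hr_pw
            exact (List.pairwise_cons.mp hr_pw).1 y hy'
          exact lt_of_lt_of_le hax this
    obtain ⟨ih1, ih2, ih3⟩ := ih hr_pw
    have hx_notin_r : x ∉ xs.dropWhile (fun y => y == x) := fun h => lt_irrefl x (hr_lt x h)
    have hcount_x : (x :: xs).count x = 1 + (xs.takeWhile (fun y => y == x)).length := by
      have h1 : (xs.takeWhile (fun y => y == x)).count x = (xs.takeWhile (fun y => y == x)).length :=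
        List.count_eq_length.mpr (fun b hb => (ht b hb).symm)
      have h2 : (xs.dropWhile (fun y => y == x)).count x = 0 :=
        List.count_eq_zero.mpr hx_notin_r
      have h3 : xs.count x = (xs.takeWhile (fun y => y == x)).count x + (xs.dropWhile (fun y => y == x)).count x := by
        conv_lhs => rw [← hsplit]
        exact List.count_append
      simp [List.count_cons_self, h3, h1, h2]
      omega
    have hcount_r : ∀ v ∈ xs.dropWhile (fun y => y == x), (x :: xs).count v = (xs.dropWhile (fun y => y == x)).count v := by
      intro v hv
      have hvx : v ≠ x := fun he => lt_irrefl x (he ▸ hr_lt v hv)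
      have h1 : (xs.takeWhile (fun y => y == x)).count v = 0 :=
        List.count_eq_zero.mpr (fun hvt => hvx (ht v hvt))
      have h3 : xs.count v = (xs.takeWhile (fun y => y == x)).count v + (xs.dropWhile (fun y => y == x)).count v := by
        conv_lhs => rw [← hsplit]
        exact List.count_append
      simp [List.count_cons, h3, h1]
      exact fun h => hvx h.symm
    have hmem_xs : ∀ v ∈ xs, v = x ∨ v ∈ xs.dropWhile (fun y => y == x) := by
      intro v hv
      rw [← hsplit] at hv
      rcases List.mem_append.mp hv with h | h
      · exact Or.inl (ht v h)
      · exact Or.inr h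
    rw [pvRuns]
    refine ⟨?_, ?_, ?_⟩
    · simp only [List.map_cons]
      refine congrArg₂ _ ?_ ?_
      · simp [hcount_x]
      · calc pvRuns (xs.dropWhile (fun y => y == x))
            = ((pvRuns (xs.dropWhile (fun y => y == x))).map Prod.fst).map
                (fun v => (v, ((xs.dropWhile (fun y => y == x)).count v : Int))) := ih1
          _ = ((pvRuns (xs.dropWhile (fun y => y == x))).map Prod.fst).map
                (fun v => (v, ((x :: xs).count v : Int))) := by
              refine List.map_congr_left ?_
              intro v hv
              rw [hcount_r v ((ih3 v).mp hv)]
    · simp only [List.map_cons]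
      refine List.pairwise_cons.mpr ⟨?_, ih2⟩
      intro y hy
      exact hr_lt y ((ih3 y).mp hy)
    · intro v
      simp only [List.map_cons, List.mem_cons, ih3]
      constructor
      · rintro (rfl | h)
        · exact Or.inl rfl
        · exact Or.inr (hrsub.mem h)
      · rintro (rfl | h)
        · exact Or.inl rfl
        · rcases hmem_xs v h with h' | h'
          · exact Or.inl h'
          · exact Or.inr h'

theorem pvRuns_sorted (C : List Int) :
    pvRuns (PySem.List.sorted C (fun x => x) false) =
      (PySem.List.sorted (PySem.Set.ofList C) (fun x => x) false).map
        (fun v => (v, (C.count v : Int))) := by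
  have hpw : (PySem.List.sorted C (fun x => x) false).Pairwise (· ≤ ·) :=
    PySem.List.sorted_pairwise C (fun x => x)
  obtain ⟨h1, h2, h3⟩ := pvRuns_spec _ hpw
  have hnd : ((pvRuns (PySem.List.sorted C (fun x => x) false)).map Prod.fst).Nodup :=
    h2.imp (fun h => ne_of_lt h)
  have hperm : ((pvRuns (PySem.List.sorted C (fun x => x) false)).map Prod.fst).Perm
      (PySem.Set.ofList C) := by
    refine (List.perm_ext_iff_of_nodup hnd (PySem.Set.nodup_ofList C)).mpr ?_
    intro a
    rw [h3 a, PySem.List.mem_sorted, PySem.Set.mem_ofList]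
  have hsorted : PySem.List.sorted (PySem.Set.ofList C) (fun x => x) false
      = (pvRuns (PySem.List.sorted C (fun x => x) false)).map Prod.fst :=
    PySem.List.sorted_eq_of_perm_of_pairwise_lt _ _ _ hperm h2
  rw [hsorted]
  calc pvRuns (PySem.List.sorted C (fun x => x) false)
      = ((pvRuns (PySem.List.sorted C (fun x => x) false)).map Prod.fst).map
          (fun v => (v, ((PySem.List.sorted C (fun x => x) false).count v : Int))) := h1
    _ = ((pvRuns (PySem.List.sorted C (fun x => x) false)).map Prod.fst).map
          (fun v => (v, (C.count v : Int))) := by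
        refine List.map_congr_left ?_
        intro v _
        rw [(PySem.List.sorted_perm C (fun x => x) false).count_eq v]

theorem countLoop (l : List Int) (f : Int → Int) :
    l.foldl (fun (d : PySem.Dict Int Int) node =>
        if d.contains (f node) = false then d.insert (f node) 1
        else d.insert (f node) (d.getD (f node) 0 + 1)) PySem.Dict.empty
      = PySem.Dict.counter (l.map f) := by
  rw [← PySem.Dict.foldl_insert_getD_add_one_eq_counter, List.foldl_map]
  have hfun : (fun (d : PySem.Dict Int Int) node =>
      if d.contains (f node) = false then d.insert (f node) 1
      else d.insert (f node) (d.getD (f node) 0 + 1))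
      = fun (d : PySem.Dict Int Int) node => d.insert (f node) (d.getD (f node) 0 + 1) := by
    funext d node
    by_cases h : d.contains (f node) = false
    · rw [if_pos h, PySem.Dict.getD_of_not_contains d 0 h]
      norm_num
    · rw [if_neg h]
  rw [hfun]

theorem buildLoop (keys : List Int) (g : Int → Int) (h : keys.Nodup) :
    (keys.foldl (fun (r : PySem.Dict Int Int) i => r.insert i (g i)) PySem.Dict.empty).items
      = keys.map (fun i => (i, g i)) := by
  have := PySem.Dict.items_foldl_insert_fresh keys (fun i => i) g PySem.Dict.empty
    (fun a _ => PySem.Dict.contains_empty a) (by simpa using h)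
  simpa using this


-- ===== VERDICT (by name: the statement is the Claim_ definition above) =====
theorem num_comm_node_belongs_spec : Claim_equal_num_comm_node_belongs := by
  intro overlap _dom
  unfold Spec_num_comm_node_belongs
  simp only [num_comm_node_belongs, num_comm_node_belongs_alt]
  rw [countLoop, PySem.Dict.keys_counter]
  rw [buildLoop _ _ ?hnd]
  case hnd =>
    exact ((PySem.List.sorted_perm _ _ _).nodup_iff).mpr (PySem.Set.nodup_ofList _)
  rw [pvRuns_sorted]
  simp only [PySem.Dict.getD_counter]
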